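-- pv_equiv track=rewrite | github.com/MatsukSket/AOIS | lab1_binary_operations/src/ieee_754.py | mul_mantissas
-- ===== SOURCE A (Python) =====
-- def add_mantissas(a: list[int], b: list[int]) -> list[int]:
--     """Сложение мантисс. Возвращает их сумму.
--     Не нормализует длину, но может работать со списками разных длин."""
--     max_len = max(len(a), len(b))
--
--     a_pad = [0] * (max_len - len(a)) + a
--     b_pad = [0] * (max_len - len(b)) + b
--
--     res = []
--     carry = 0
--
--     for i in range(max_len - 1, -1, -1):
--         cur_sum = a_pad[i] + b_pad[i] + carry
--         res.insert(0, cur_sum % 2)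
--         carry = cur_sum // 2
--     if carry:
--         res.insert(0, 1)
--
--     return res
--
-- def mul_mantissas(a: list[int], b: list[int]) -> list[int]:
--     """Умножение мантисс. Возвращает произведение."""
--     res = [0]
--
--     for i in range(len(b)):
--         if b[i] == 1:
--             shift = len(b) - 1 - i
--             shifted_a = a + [0] * shift
--             res = add_mantissas(res, shifted_a)
--
--     return res
-- ===== SOURCE B (Python) =====
-- def _val(digits):
--     """Value of a big-endian digit list (digits need not be 0/1): sum(d * 2**place)."""
--     if len(digits) <= 16:
--         v = 0
--         for d in digits:
--             v = 2 * v + d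
--         return v
--     m = len(digits) // 2
--     return _val(digits[:m]) * (1 << (len(digits) - m)) + _val(digits[m:])
--
--
-- def _bits(v, m):
--     """The m lowest binary digits of v (0 <= v), most significant first."""
--     if m <= 16:
--         return [(v >> (m - 1 - j)) & 1 for j in range(m)]
--     k = m // 2
--     return _bits(v >> k, m - k) + _bits(v & ((1 << k) - 1), k)
--
--
-- def mul_mantissas(a: list[int], b: list[int]) -> list[int]:
--     """Умножение мантисс. Возвращает произведение."""
--     n = len(b)
--     va = None
--     rval, rlen = 0, 1
--     start = 0
--     while True:
--         try:
--             i = b.index(1, start)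
--         except ValueError:
--             break
--         start = i + 1
--         if va is None:
--             va = _val(a)
--         shift = n - 1 - i
--         m = max(rlen, len(a) + shift)
--         s = rval + va * (1 << shift)
--         low = s % (1 << m)
--         if s >> m:
--             rval, rlen = (1 << m) + low, m + 1
--         else:
--             rval, rlen = low, m
--     return _bits(rval, rlen)
-- ===== Notes on version B (the rewrite author's own statement) =====
-- stated objective: alternative
-- what changed: B replaces A's per-set-bit ripple-carry list additions (pad, digit-by-digit carry loop, list inserts) by big-integer arithmetic on a lazily computed (value, length) pair: divide-and-conquer list-to-int conversion, one modular add/shift per set bit of b found via list.index, and divide-and-conquer bit formatting at the end; it trades A's list manipulation for machine-int arithmetic, which wins only when b actually contains 1-bits.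
import Mathlib
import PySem

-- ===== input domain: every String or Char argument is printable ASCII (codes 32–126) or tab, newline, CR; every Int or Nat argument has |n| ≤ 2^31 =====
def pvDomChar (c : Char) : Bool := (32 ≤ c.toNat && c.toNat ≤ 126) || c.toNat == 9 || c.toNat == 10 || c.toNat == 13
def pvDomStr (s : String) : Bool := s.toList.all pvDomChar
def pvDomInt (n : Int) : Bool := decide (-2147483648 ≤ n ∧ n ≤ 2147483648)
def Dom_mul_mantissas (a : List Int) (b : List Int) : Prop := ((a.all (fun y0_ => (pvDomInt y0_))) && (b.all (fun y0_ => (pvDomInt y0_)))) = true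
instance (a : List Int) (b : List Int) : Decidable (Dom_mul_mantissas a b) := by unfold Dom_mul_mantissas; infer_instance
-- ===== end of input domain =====

-- B replaces the per-set-bit ripple-carry list additions by big-integer arithmetic on a lazily
-- computed (value, length) representation of the running result, formatting the bits once at the end.

-- ===== PORT A =====
-- the 'for i in range(max_len-1,-1,-1)' loop of add_mantissas: state (res, carry),
-- iterating over the two padded lists from their right end (reversed), res.insert(0, ·) = cons onto acc
def pvAddGo : List Int → List Int → Int → List Int → List Int
  | x :: xs, y :: ys, c, acc =>
      pvAddGo xs ys (PySem.Int.floordiv (x + y + c) 2) (PySem.Int.mod (x + y + c) 2 :: acc)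
  | _, _, c, acc => if c ≠ 0 then 1 :: acc else acc

def add_mantissas (a : List Int) (b : List Int) : List Int :=
  let maxLen := max a.length b.length
  pvAddGo (List.replicate (maxLen - a.length) 0 ++ a).reverse
          (List.replicate (maxLen - b.length) 0 ++ b).reverse 0 []

def mul_mantissas (a : List Int) (b : List Int) : List Int :=
  (PySem.List.enumerate b 0).foldl (fun res ib =>
    if ib.2 = 1 then
      add_mantissas res (a ++ List.replicate (b.length - 1 - ib.1.toNat) 0)
    else res) [0]

-- ===== PORT B =====
-- _val: divide-and-conquer conversion of a digit list to its integer value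
def pvValAlt (digits : List Int) : Int :=
  if h : digits.length <= 16 then digits.foldl (fun v d => 2 * v + d) 0
  else
    let m := digits.length / 2
    pvValAlt (digits.take m) * ((1:Int) <<< (digits.length - m)) + pvValAlt (digits.drop m)
termination_by digits.length
decreasing_by
  · simp only [List.length_take]; omega
  · simp only [List.length_drop]; omega

-- _bits: divide-and-conquer formatting of the m lowest binary digits of v, MSB first
def pvBitsAlt (v : Int) (m : Nat) : List Int :=
  if h : m <= 16 then (List.range m).map (fun j => PySem.Int.band (v >>> (m - 1 - j)) 1)
  else
    let k := m / 2
    pvBitsAlt (v >>> k) (m - k) ++ pvBitsAlt (PySem.Int.band v (((1:Int) <<< k) - 1)) k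
termination_by m
decreasing_by
  · omega
  · omega

-- the 'while True' loop of B: state (va, rval, rlen, start), va computed lazily on the first hit;
-- b.index(1, start) (ValueError = none) is PySem.List.index? of the dropped prefix, shifted by start (exact)
def pvMulLoop (a : List Int) (n : Nat) (b : List Int) (start : Nat) (va? : Option Int)
    (rv : Int) (rl : Nat) : Int × Nat :=
  match h : PySem.List.index? (b.drop start) 1 with
  | none => (rv, rl)
  | some k =>
    let i := start + k
    let va := match va? with | none => pvValAlt a | some v => v
    let shift := n - 1 - i
    let m := max rl (a.length + shift)
    let s := rv + va * ((1:Int) <<< shift)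
    let low := PySem.Int.mod s ((1:Int) <<< m)
    if s >>> m ≠ 0 then pvMulLoop a n b (i + 1) (some va) ((1:Int) <<< m + low) (m + 1)
    else pvMulLoop a n b (i + 1) (some va) low m
termination_by b.length - start
decreasing_by
  all_goals
    obtain ⟨hk, -, -⟩ := PySem.List.getElem_of_index?_eq_some h
    simp only [List.length_drop] at hk
    omega

def mul_mantissas_alt (a : List Int) (b : List Int) : List Int :=
  let p := pvMulLoop a b.length b 0 none 0 1
  pvBitsAlt p.1 p.2

-- ===== PRECONDITION & SPEC =====
def Spec_mul_mantissas (a : List Int) (b : List Int) (out : List Int) : Prop := out = mul_mantissas_alt a b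
instance (a : List Int) (b : List Int) (out : List Int) : Decidable (Spec_mul_mantissas a b out) := by unfold Spec_mul_mantissas; infer_instance

-- ===== CLAIM (what is proved, stated in full; the proofs are below) =====
def Claim_equal_mul_mantissas : Prop := ∀ (a : List Int) (b : List Int), Dom_mul_mantissas a b → Spec_mul_mantissas a b (mul_mantissas a b)

-- ===== LEMMAS AND PROOFS =====

/-- value of a big-endian digit list (digits may be arbitrary ints), as B's first loop computes it -/
def pvVal (l : List Int) : Int := l.foldl (fun v d => 2 * v + d) 0

/-- value of a little-endian digit list -/
def pvValRev : List Int → Int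
  | [] => 0
  | d :: ds => d + 2 * pvValRev ds

/-- the m lowest binary digits of v, most significant first -/
def pvBits (m : Nat) (v : Int) : List Int :=
  (List.range m).map (fun j => v / 2 ^ (m - 1 - j) % 2)

lemma pvVal_foldl (l : List Int) (v : Int) :
    l.foldl (fun v d => 2 * v + d) v = v * 2 ^ l.length + pvVal l := by
  induction l generalizing v with
  | nil => simp [pvVal]
  | cons d t ih =>
    simp only [List.foldl_cons, List.length_cons, pvVal]
    rw [ih (2 * v + d), ih (2 * 0 + d)]
    ring

lemma pvVal_cons (d : Int) (l : List Int) : pvVal (d :: l) = d * 2 ^ l.length + pvVal l := by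
  simp only [pvVal, List.foldl_cons]
  rw [pvVal_foldl l (2 * 0 + d)]
  show (2 * 0 + d) * 2 ^ l.length + pvVal l = d * 2 ^ l.length + pvVal l
  ring

lemma pvValRev_append_singleton (l : List Int) (d : Int) :
    pvValRev (l ++ [d]) = pvValRev l + d * 2 ^ l.length := by
  induction l with
  | nil => simp [pvValRev]
  | cons x t ih =>
    simp only [List.cons_append, pvValRev, List.length_cons, ih]
    ring

lemma pvValRev_reverse (l : List Int) : pvValRev l.reverse = pvVal l := by
  induction l with
  | nil => rfl
  | cons d t ih =>
    rw [List.reverse_cons, pvValRev_append_singleton, ih, List.length_reverse, pvVal_cons]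
    ring

lemma pvVal_replicate_zero_append (k : Nat) (l : List Int) :
    pvVal (List.replicate k 0 ++ l) = pvVal l := by
  induction k with
  | zero => simp
  | succ k ih => simpa [pvVal, List.replicate_succ] using ih

lemma pvVal_append_replicate_zero (l : List Int) (s : Nat) :
    pvVal (l ++ List.replicate s 0) = pvVal l * 2 ^ s := by
  induction s with
  | zero => simp
  | succ s ih =>
    rw [List.replicate_succ', ← List.append_assoc]
    simp only [pvVal, List.foldl_append, List.foldl_cons, List.foldl_nil] at ih ⊢
    rw [ih]
    ring

lemma pvBits_length (m : Nat) (v : Int) : (pvBits m v).length = m := by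
  simp [pvBits]

lemma pvBits_succ_cons (m : Nat) (v : Int) :
    pvBits (m + 1) v = (v / 2 ^ m % 2) :: pvBits m v := by
  simp only [pvBits, List.range_succ_eq_map, List.map_cons, List.map_map, Nat.add_sub_cancel,
    Nat.sub_zero]
  congr 1
  apply List.map_congr_left
  intro j _
  simp only [Function.comp_apply]
  rw [show m - j.succ = m - 1 - j by omega]

lemma pvBits_succ_snoc (m : Nat) (v : Int) :
    pvBits (m + 1) v = pvBits m (v / 2) ++ [v % 2] := by
  simp only [pvBits, List.range_succ, List.map_append, List.map_cons, List.map_nil,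
    Nat.add_sub_cancel, Nat.sub_self, pow_zero, Int.ediv_one]
  congr 1
  apply List.map_congr_left
  intro j hj
  rw [List.mem_range] at hj
  rw [Int.ediv_ediv_eq_ediv_mul (show (0:Int) ≤ 2 by norm_num), ← pow_succ',
    show m - 1 - j + 1 = m - j by omega]

lemma pvBits_emod (m : Nat) (v : Int) : pvBits m (v % 2 ^ m) = pvBits m v := by
  apply List.map_congr_left
  intro j hj
  rw [List.mem_range] at hj
  set k := m - 1 - j with hk
  obtain ⟨e, he⟩ : ∃ e, m - k = e + 1 := ⟨m - k - 1, by omega⟩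
  have h2 : (2:Int) ^ k * (2 * 2 ^ e) = 2 ^ m := by
    rw [← pow_succ', ← pow_add, show k + (e + 1) = m by omega]
  have hv : v = v % 2 ^ m + 2 ^ k * (2 * (2 ^ e * (v / 2 ^ m))) := by
    have h := Int.ediv_add_emod v (2 ^ m)
    have : (2:Int) ^ k * (2 * (2 ^ e * (v / 2 ^ m))) = (2 ^ k * (2 * 2 ^ e)) * (v / 2 ^ m) := by
      ring
    rw [this, h2]
    linarith
  calc v % 2 ^ m / 2 ^ k % 2
      = (v % 2 ^ m / 2 ^ k + 2 * (2 ^ e * (v / 2 ^ m))) % 2 := by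
        rw [Int.add_mul_emod_self_left]
    _ = v / 2 ^ k % 2 := by
        congr 1
        conv_rhs => rw [hv]
        rw [Int.add_mul_ediv_left _ _ (by positivity : (2:Int) ^ k ≠ 0)]

lemma pvVal_pvBits (m : Nat) (v : Int) (h0 : 0 ≤ v) (h1 : v < 2 ^ m) :
    pvVal (pvBits m v) = v := by
  induction m generalizing v with
  | zero =>
    simp [pvBits, pvVal]
    omega
  | succ m ih =>
    have h2 : (0:Int) < 2 ^ m := by positivity
    rw [pvBits_succ_cons, pvVal_cons, pvBits_length, ← pvBits_emod,
      ih (v % 2 ^ m) (Int.emod_nonneg v (by positivity)) (Int.emod_lt_of_pos v h2)]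
    have hq0 : 0 ≤ v / 2 ^ m := Int.ediv_nonneg h0 (le_of_lt h2)
    have hq2 : v / 2 ^ m < 2 := by
      rw [Int.ediv_lt_iff_lt_mul h2]
      calc v < 2 ^ (m + 1) := h1
        _ = 2 * 2 ^ m := by rw [pow_succ]; ring
    rw [Int.emod_eq_of_lt hq0 hq2]
    have h := Int.ediv_add_emod v (2 ^ m)
    linarith

lemma pvAddGo_spec (xr yr : List Int) (c : Int) (acc : List Int)
    (hlen : xr.length = yr.length) :
    pvAddGo xr yr c acc =
      (let S := pvValRev xr + pvValRev yr + c
       if S / 2 ^ xr.length ≠ 0 then 1 :: (pvBits xr.length S ++ acc)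
       else pvBits xr.length S ++ acc) := by
  induction xr generalizing yr c acc with
  | nil =>
    cases yr with
    | nil => simp [pvAddGo, pvValRev, pvBits]
    | cons y ys => simp at hlen
  | cons x xs ih =>
    cases yr with
    | nil => simp at hlen
    | cons y ys =>
      simp only [List.length_cons, Nat.add_right_cancel_iff] at hlen
      show pvAddGo xs ys _ _ = _
      rw [PySem.Int.floordiv_eq_ediv_of_pos (by norm_num), PySem.Int.mod_eq_emod_of_pos (by norm_num)]
      rw [ih ys ((x + y + c) / 2) ((x + y + c) % 2 :: acc) hlen]
      simp only [pvValRev, List.length_cons]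
      set V : Int := x + 2 * pvValRev xs + (y + 2 * pvValRev ys) + c with hV
      have hS : V = (x + y + c) + 2 * (pvValRev xs + pvValRev ys) := by rw [hV]; ring
      have hS' : pvValRev xs + pvValRev ys + (x + y + c) / 2 = V / 2 := by
        rw [hS, Int.add_mul_ediv_left _ _ (by norm_num : (2:Int) ≠ 0)]
        ring
      have hdiv : V / 2 / 2 ^ xs.length = V / 2 ^ (xs.length + 1) := by
        rw [Int.ediv_ediv_eq_ediv_mul (show (0:Int) ≤ 2 by norm_num), ← pow_succ']
      have hmod : (x + y + c) % 2 = V % 2 := by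
        conv_rhs => rw [hS]
        rw [Int.add_mul_emod_self_left]
      rw [hS', hdiv, hmod, pvBits_succ_snoc, List.append_assoc, List.singleton_append]

lemma add_mantissas_spec (x y : List Int) :
    add_mantissas x y =
      (let m := max x.length y.length
       let S := pvVal x + pvVal y
       if S / 2 ^ m ≠ 0 then 1 :: pvBits m S else pvBits m S) := by
  simp only [add_mantissas]
  rw [pvAddGo_spec _ _ 0 [] (by simp)]
  simp only [List.length_reverse, List.length_append, List.length_replicate, pvValRev_reverse,
    pvVal_replicate_zero_append, add_zero, List.append_nil,
    show max x.length y.length - x.length + x.length = max x.length y.length by omega]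

lemma pvBits_fmt (rl : Nat) (v : Int) :
    (List.range rl).map (fun j => PySem.Int.band (v >>> (rl - 1 - j)) 1) = pvBits rl v := by
  apply List.map_congr_left
  intro j _
  rw [PySem.Int.band_one, PySem.Int.mod_eq_emod_of_pos (by norm_num), Int.shiftRight_eq_div_pow]
  norm_cast

lemma pvOneShl (k : Nat) : ((1:Int) <<< k) = 2 ^ k := by
  rw [Int.shiftLeft_eq]; ring

lemma pvVal_append (s t : List Int) : pvVal (s ++ t) = pvVal s * 2 ^ t.length + pvVal t := by
  simp only [pvVal, List.foldl_append]
  rw [pvVal_foldl]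
  rfl

lemma pvValAlt_eq (l : List Int) : pvValAlt l = pvVal l := by
  induction l using pvValAlt.induct with
  | case1 l h => rw [pvValAlt, dif_pos h]; rfl
  | case2 l h m ih1 ih2 =>
    rw [pvValAlt, dif_neg h]
    show pvValAlt (l.take (l.length / 2)) * ((1:Int) <<< (l.length - l.length / 2))
        + pvValAlt (l.drop (l.length / 2)) = pvVal l
    rw [ih1, ih2, pvOneShl]
    conv_rhs => rw [← List.take_append_drop (l.length / 2) l, pvVal_append]
    rw [List.length_drop]

lemma pvBits_split (v : Int) (m k : Nat) (hk : k ≤ m) :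
    pvBits m v = pvBits (m - k) (v / 2 ^ k) ++ pvBits k v := by
  obtain ⟨d, rfl⟩ : ∃ d, m = d + k := ⟨m - k, by omega⟩
  simp only [pvBits, Nat.add_sub_cancel]
  rw [List.range_add, List.map_append, List.map_map]
  congr 1
  · apply List.map_congr_left
    intro j hj
    rw [List.mem_range] at hj
    rw [Int.ediv_ediv_eq_ediv_mul (show (0:Int) ≤ 2 ^ k by positivity), ← pow_add,
      show k + (d - 1 - j) = d + k - 1 - j by omega]
  · apply List.map_congr_left
    intro i hi
    rw [List.mem_range] at hi
    simp only [Function.comp_apply]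
    rw [show d + k - 1 - (d + i) = k - 1 - i by omega]

lemma pvBitsAlt_eq (m : Nat) (v : Int) (h0 : 0 ≤ v) : pvBitsAlt v m = pvBits m v := by
  induction m using Nat.strong_induction_on generalizing v with
  | _ m ih =>
    rw [pvBitsAlt]
    by_cases h : m ≤ 16
    · rw [dif_pos h]
      exact pvBits_fmt m v
    · rw [dif_neg h]
      have hk : (0:Int) < 2 ^ (m / 2) := by positivity
      have hsr : v >>> (m / 2) = v / 2 ^ (m / 2) := by
        rw [Int.shiftRight_eq_div_pow]; norm_cast
      have hmask : PySem.Int.band v (((1:Int) <<< (m / 2)) - 1) = v % 2 ^ (m / 2) := by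
        rw [pvOneShl, PySem.Int.band_of_nonneg h0
          (by have := Int.lt_iff_add_one_le.mp hk; linarith)]
        have hc : ((2:Int) ^ (m / 2)) = ((2 ^ (m / 2) : Nat) : Int) := by push_cast; rfl
        have h1 : ((2:Int) ^ (m / 2) - 1).toNat = 2 ^ (m / 2) - 1 := by
          rw [hc, ← Nat.cast_one, ← Nat.cast_sub Nat.one_le_two_pow, Int.toNat_natCast]
        rw [h1, Nat.and_two_pow_sub_one_eq_mod]
        push_cast
        rw [Int.toNat_of_nonneg h0]
      show pvBitsAlt (v >>> (m / 2)) (m - m / 2)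
          ++ pvBitsAlt (PySem.Int.band v (((1:Int) <<< (m / 2)) - 1)) (m / 2) = pvBits m v
      rw [ih (m - m / 2) (by omega) _
            (by rw [hsr]; exact Int.ediv_nonneg h0 (le_of_lt hk)),
          ih (m / 2) (by omega) _
            (by rw [hmask]; exact Int.emod_nonneg v (ne_of_gt hk))]
      rw [hsr, hmask, pvBits_emod, ← pvBits_split v m (m / 2) (by omega)]

-- the state update B performs for one set bit of b, written out (proof helper)
def pvStep (a : List Int) (n : Nat) (i : Nat) (va rv : Int) (rl : Nat) : Int × Nat :=
  if (rv + va * ((1:Int) <<< (n - 1 - i))) >>> (max rl (a.length + (n - 1 - i))) ≠ 0 then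
    ((1:Int) <<< (max rl (a.length + (n - 1 - i)))
       + PySem.Int.mod (rv + va * ((1:Int) <<< (n - 1 - i)))
           ((1:Int) <<< (max rl (a.length + (n - 1 - i)))),
     max rl (a.length + (n - 1 - i)) + 1)
  else
    (PySem.Int.mod (rv + va * ((1:Int) <<< (n - 1 - i)))
       ((1:Int) <<< (max rl (a.length + (n - 1 - i)))),
     max rl (a.length + (n - 1 - i)))

lemma mul_step_spec (a : List Int) (n : Nat) (i : Nat) (rv : Int) (rl : Nat)
    (h0 : 0 ≤ rv) (h1 : rv < 2 ^ rl) :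
    add_mantissas (pvBits rl rv) (a ++ List.replicate (n - 1 - i) 0)
        = pvBits (pvStep a n i (pvVal a) rv rl).2 (pvStep a n i (pvVal a) rv rl).1
      ∧ 0 ≤ (pvStep a n i (pvVal a) rv rl).1
      ∧ (pvStep a n i (pvVal a) rv rl).1 < 2 ^ (pvStep a n i (pvVal a) rv rl).2 := by
  rw [add_mantissas_spec]
  simp only [pvStep, pvBits_length, List.length_append, List.length_replicate,
    pvVal_pvBits rl rv h0 h1, pvVal_append_replicate_zero]
  set shift := n - 1 - i with hshift
  set m := max rl (a.length + shift) with hm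
  have h2m : (0:Int) < 2 ^ m := by positivity
  have hsl : ∀ k : Nat, ((1:Int) <<< k) = 2 ^ k := fun k => by
    rw [Int.shiftLeft_eq]; ring
  have hsr : ∀ (w : Int) (k : Nat), w >>> k = w / 2 ^ k := fun w k => by
    rw [Int.shiftRight_eq_div_pow]; norm_cast
  rw [hsl shift, hsl m, hsr, PySem.Int.mod_eq_emod_of_pos h2m]
  set S := rv + pvVal a * 2 ^ shift with hSdef
  have hlow0 : 0 ≤ S % 2 ^ m := Int.emod_nonneg _ (ne_of_gt h2m)
  have hlow1 : S % 2 ^ m < 2 ^ m := Int.emod_lt_of_pos _ h2m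
  by_cases hc : S / 2 ^ m ≠ 0
  · rw [if_pos hc, if_pos hc]
    have hb : (1 : Int) :: pvBits m S = pvBits (m + 1) (2 ^ m + S % 2 ^ m) := by
      rw [pvBits_succ_cons]
      have hq : (2 ^ m + S % 2 ^ m) / 2 ^ m = 1 := by
        have hd := Int.add_mul_ediv_left (S % 2 ^ m) 1 (ne_of_gt h2m)
        rw [mul_one] at hd
        rw [add_comm, hd, Int.ediv_eq_zero_of_lt hlow0 hlow1, zero_add]
      have ht : pvBits m (2 ^ m + S % 2 ^ m) = pvBits m S := by
        have hd := Int.add_mul_emod_self_left (S % 2 ^ m) (2 ^ m) 1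
        rw [mul_one] at hd
        rw [← pvBits_emod m (2 ^ m + S % 2 ^ m), add_comm, hd,
          Int.emod_eq_of_lt hlow0 hlow1, pvBits_emod]
      rw [hq, ht]
      norm_num
    exact ⟨hb, by positivity, by rw [pow_succ]; omega⟩
  · rw [if_neg hc, if_neg hc]
    exact ⟨by rw [← pvBits_emod m S], hlow0, hlow1⟩

lemma pvMulLoop_eq_none (a : List Int) (n : Nat) (b : List Int) (start : Nat)
    (va? : Option Int) (rv : Int) (rl : Nat)
    (h : PySem.List.index? (b.drop start) 1 = none) :
    pvMulLoop a n b start va? rv rl = (rv, rl) := by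
  rw [pvMulLoop.eq_def]
  split
  · rfl
  · next k heq =>
    rw [h] at heq
    cases heq

lemma pvMulLoop_eq_some (a : List Int) (n : Nat) (b : List Int) (start : Nat)
    (va? : Option Int) (rv : Int) (rl : Nat) (k : Nat) (va : Int)
    (h : PySem.List.index? (b.drop start) 1 = some k)
    (hva : va?.getD (pvValAlt a) = va) :
    pvMulLoop a n b start va? rv rl =
      pvMulLoop a n b (start + k + 1) (some va)
        (pvStep a n (start + k) va rv rl).1 (pvStep a n (start + k) va rv rl).2 := by
  subst hva
  rw [pvMulLoop.eq_def]
  split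
  · next heq =>
    rw [h] at heq
    cases heq
  · next k' heq =>
    rw [h] at heq
    cases heq
    cases va? <;> simp only [Option.getD_none, Option.getD_some, pvStep] <;> split <;> rfl

lemma fold_skip (a : List Int) (n : Nat) (l : List (Int × Int)) (init : List Int)
    (hno : ∀ p ∈ l, p.2 ≠ 1) :
    l.foldl (fun res ib =>
      if ib.2 = 1 then
        add_mantissas res (a ++ List.replicate (n - 1 - ib.1.toNat) 0)
      else res) init = init := by
  induction l with
  | nil => rfl
  | cons p t ih =>
    rw [List.foldl_cons, if_neg (hno p List.mem_cons_self)]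
    exact ih (fun q hq => hno q (List.mem_cons_of_mem p hq))

lemma pvMulLoop_spec (a : List Int) (n : Nat) (b : List Int) :
    ∀ (d start : Nat) (va? : Option Int) (rv : Int) (rl : Nat),
      b.length - start ≤ d →
      (va? = none ∨ va? = some (pvVal a)) → 0 ≤ rv → rv < 2 ^ rl →
      ((PySem.List.enumerate (b.drop start) (start : Int)).foldl
          (fun res ib => if ib.2 = 1 then
            add_mantissas res (a ++ List.replicate (n - 1 - ib.1.toNat) 0) else res)
          (pvBits rl rv)
        = pvBits (pvMulLoop a n b start va? rv rl).2 (pvMulLoop a n b start va? rv rl).1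
       ∧ 0 ≤ (pvMulLoop a n b start va? rv rl).1
       ∧ (pvMulLoop a n b start va? rv rl).1 < 2 ^ (pvMulLoop a n b start va? rv rl).2) := by
  intro d
  induction d with
  | zero =>
    intro start va? rv rl hd hva h0 h1
    have hdrop : b.drop start = [] := by
      rw [List.drop_eq_nil_iff]
      omega
    rw [pvMulLoop_eq_none a n b start va? rv rl (by rw [hdrop]; rfl), hdrop]
    exact ⟨rfl, h0, h1⟩
  | succ d ihd =>
    intro start va? rv rl hd hva h0 h1
    cases hidx : PySem.List.index? (b.drop start) 1 with
    | none =>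
      rw [pvMulLoop_eq_none a n b start va? rv rl hidx]
      have hnot : (1:Int) ∉ b.drop start := (PySem.List.index?_eq_none_iff _ _).mp hidx
      refine ⟨fold_skip a n _ _ ?_, h0, h1⟩
      intro p hp
      obtain ⟨j, hj, rfl⟩ := (PySem.List.mem_enumerate_iff _ _ _).mp hp
      exact fun hcon => hnot (hcon ▸ List.getElem_mem hj)
    | some k =>
      have hgd : va?.getD (pvValAlt a) = pvVal a := by
        rcases hva with rfl | rfl
        · exact pvValAlt_eq a
        · rfl
      rw [pvMulLoop_eq_some a n b start va? rv rl k (pvVal a) hidx hgd]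
      obtain ⟨pre, suf, hsplit, hlen, hpre⟩ := (PySem.List.index?_eq_some_iff _ _ _).mp hidx
      obtain ⟨hk, -, -⟩ := PySem.List.getElem_of_index?_eq_some hidx
      rw [List.length_drop] at hk
      have hsuf : b.drop (start + k + 1) = suf := by
        have hdd : (b.drop start).drop (k + 1) = b.drop (start + (k + 1)) := by
          rw [List.drop_drop]
        rw [← Nat.add_assoc] at hdd
        rw [← hdd, hsplit, ← hlen]
        exact List.drop_length_add_append 1
      have hskip : ∀ p ∈ PySem.List.enumerate pre (start : Int), p.2 ≠ (1:Int) := by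
        intro p hp
        obtain ⟨j, hj, rfl⟩ := (PySem.List.mem_enumerate_iff _ _ _).mp hp
        exact fun hcon => hpre (hcon ▸ List.getElem_mem hj)
      rw [hsplit, PySem.List.enumerate_append, PySem.List.enumerate_cons, List.foldl_append,
        fold_skip a n (PySem.List.enumerate pre (start : Int)) _ hskip, List.foldl_cons,
        if_pos rfl]
      have hcast1 : ((start : Int) + (pre.length : Int)).toNat = start + k := by
        omega
      have hcast2 : (start : Int) + (pre.length : Int) + 1 = ((start + k + 1 : Nat) : Int) := by
        push_cast [hlen]
        ring
      rw [hcast1, hcast2, ← hsuf]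
      obtain ⟨hstep, hP0, hP1⟩ := mul_step_spec a n (start + k) rv rl h0 h1
      rw [hstep]
      exact ihd (start + k + 1) (some (pvVal a)) _ _ (by omega) (Or.inr rfl) hP0 hP1

-- ===== VERDICT (by name: the statement is the Claim_ definition above) =====
theorem mul_mantissas_spec : Claim_equal_mul_mantissas := by
  intro a b _
  show mul_mantissas a b = mul_mantissas_alt a b
  simp only [mul_mantissas, mul_mantissas_alt]
  rw [show [(0:Int)] = pvBits 1 0 by decide]
  obtain ⟨heq, hge, _⟩ :=
    pvMulLoop_spec a b.length b (b.length) 0 none 0 1 (by omega) (Or.inl rfl)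
      (by norm_num) (by norm_num)
  rw [List.drop_zero] at heq
  rw [show ((0 : Nat) : Int) = 0 by rfl] at heq
  rw [heq]
  exact (pvBitsAlt_eq _ _ hge).symm
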